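-- pv_equiv track=rewrite | github.com/henryrbolden-henryai/henryai-app | backend/recommendation/final_controller.py | get_recommendation_from_score
-- ===== SOURCE A (Python) =====
-- from enum import Enum
--
-- class Recommendation(str, Enum):
--     """
--     Six-Tier Recommendation System.
--
--     Per HenryHQ Scoring Spec v2.0 (Dec 21, 2025)
--     These boundaries are hardcoded and may NOT be overridden.
--     """
--     STRONG_APPLY = "Strong Apply"
--     APPLY = "Apply"
--     CONSIDER = "Consider"
--     APPLY_WITH_CAUTION = "Apply with Caution"
--     LONG_SHOT = "Long Shot"
--     DO_NOT_APPLY = "Do Not Apply"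
--
-- SCORE_TO_RECOMMENDATION = {
--     (85, 101): Recommendation.STRONG_APPLY,
--     (70, 85): Recommendation.APPLY,
--     (55, 70): Recommendation.CONSIDER,
--     (40, 55): Recommendation.APPLY_WITH_CAUTION,
--     (25, 40): Recommendation.LONG_SHOT,
--     (0, 25): Recommendation.DO_NOT_APPLY,
-- }
--
-- def get_recommendation_from_score(score: int) -> Recommendation:
--     """
--     Get the correct recommendation for a given score.
--     This is the ONLY function that should determine recommendation from score.
--
--     Args:
--         score: Fit score (0-100)
--
--     Returns:
--         Recommendation enum value
--     """
--     for (low, high), rec in SCORE_TO_RECOMMENDATION.items():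
--         if low <= score < high:
--             return rec
--
--     # Edge case: exactly 100
--     if score >= 100:
--         return Recommendation.STRONG_APPLY
--
--     # Fallback for invalid scores
--     if score < 0:
--         return Recommendation.DO_NOT_APPLY
--     return Recommendation.STRONG_APPLY
-- ===== SOURCE B (Python) =====
-- import bisect
-- from enum import Enum
--
-- class Recommendation(str, Enum):
--     STRONG_APPLY = "Strong Apply"
--     APPLY = "Apply"
--     CONSIDER = "Consider"
--     APPLY_WITH_CAUTION = "Apply with Caution"
--     LONG_SHOT = "Long Shot"
--     DO_NOT_APPLY = "Do Not Apply"
--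
-- _BOUNDS = [25, 40, 55, 70, 85]
-- _TIERS = [
--     Recommendation.DO_NOT_APPLY,
--     Recommendation.LONG_SHOT,
--     Recommendation.APPLY_WITH_CAUTION,
--     Recommendation.CONSIDER,
--     Recommendation.APPLY,
--     Recommendation.STRONG_APPLY,
-- ]
--
-- def get_recommendation_from_score(score: int) -> Recommendation:
--     return _TIERS[bisect.bisect_right(_BOUNDS, score)]
-- ===== Notes on version B (the rewrite author's own statement) =====
-- stated objective: idiomatic
-- what changed: Replaced the linear scan over (low,high) interval pairs plus the trailing out-of-range fallback guards with a single bisect_right lookup into a sorted boundary array and a parallel tier table.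
import Mathlib
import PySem

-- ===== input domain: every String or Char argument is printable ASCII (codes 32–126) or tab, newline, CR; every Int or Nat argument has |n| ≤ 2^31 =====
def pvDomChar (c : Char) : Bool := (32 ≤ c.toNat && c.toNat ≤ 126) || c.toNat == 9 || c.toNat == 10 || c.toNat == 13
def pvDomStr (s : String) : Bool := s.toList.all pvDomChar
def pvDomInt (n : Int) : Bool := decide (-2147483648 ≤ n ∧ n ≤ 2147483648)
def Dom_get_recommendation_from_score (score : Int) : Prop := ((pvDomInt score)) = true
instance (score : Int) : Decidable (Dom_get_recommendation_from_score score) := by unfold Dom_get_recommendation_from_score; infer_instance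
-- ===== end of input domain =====

-- B replaces A's linear scan over interval pairs (plus fallback guards) with a
-- bisect_right lookup into a sorted boundary array (objective: idiomatic).

-- ===== PORT A =====
-- the SCORE_TO_RECOMMENDATION dict, in insertion order
def pvScoreTable : List ((Int × Int) × String) :=
  [((85, 101), "Strong Apply"),
   ((70, 85), "Apply"),
   ((55, 70), "Consider"),
   ((40, 55), "Apply with Caution"),
   ((25, 40), "Long Shot"),
   ((0, 25), "Do Not Apply")]

-- the 'for … if low <= score < high: return rec' loop
def pvScanTable : List ((Int × Int) × String) → Int → Option String
  | [], _ => none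
  | ((low, high), rec) :: rest, score =>
      if low ≤ score ∧ score < high then some rec else pvScanTable rest score

def get_recommendation_from_score (score : Int) : String :=
  match pvScanTable pvScoreTable score with
  | some rec => rec
  | none =>
      if score ≥ 100 then "Strong Apply"
      else if score < 0 then "Do Not Apply"
      else "Strong Apply"

-- ===== PORT B =====
def pvBounds : List Int := [25, 40, 55, 70, 85]
def pvTiers : List String :=
  ["Do Not Apply", "Long Shot", "Apply with Caution", "Consider", "Apply", "Strong Apply"]

def get_recommendation_from_score_alt (score : Int) : String :=
  -- bisect.bisect_right on a sorted list = number of elements ≤ score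
  pvTiers.getD (pvBounds.countP (fun b => decide (b ≤ score))) ""

-- ===== PRECONDITION & SPEC =====
def Spec_get_recommendation_from_score (score : Int) (out : String) : Prop := out = get_recommendation_from_score_alt score
instance (score : Int) (out : String) : Decidable (Spec_get_recommendation_from_score score out) := by unfold Spec_get_recommendation_from_score; infer_instance

-- ===== CLAIM (what is proved, stated in full; the proofs are below) =====
def Claim_equal_get_recommendation_from_score : Prop := ∀ (score : Int), Dom_get_recommendation_from_score score → Spec_get_recommendation_from_score score (get_recommendation_from_score score)

-- ===== LEMMAS AND PROOFS =====

-- ===== VERDICT (by name: the statement is the Claim_ definition above) =====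
theorem get_recommendation_from_score_spec : Claim_equal_get_recommendation_from_score := by
  intro score _
  unfold Spec_get_recommendation_from_score get_recommendation_from_score
    get_recommendation_from_score_alt
  simp only [pvScoreTable, pvScanTable, pvBounds, pvTiers]
  split_ifs <;> simp only [List.countP_cons, List.countP_nil] <;> split_ifs <;>
    simp only [decide_eq_true_eq, not_le, not_and, not_lt] at * <;> first | omega | norm_num
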